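-- pv_equiv track=rewrite | github.com/xiaoyuxiaofen/TADA_T2 | TADA_V2_GPU/src/predict_tad.py | clean_sequences
-- ===== SOURCE A (Python) =====
-- _VALID_AA = set('ACDEFGHIKLMNPQRSTVWY')
--
-- def clean_sequences(sequences):
--     cleaned = {}
--     affected = 0
--     total_removed = 0
--     for name, seq in sequences.items():
--         new_seq = ''.join(aa for aa in seq if aa in _VALID_AA)
--         if len(new_seq) != len(seq):
--             affected += 1
--             total_removed += len(seq) - len(new_seq)
--         cleaned[name] = new_seq
--     return cleaned, affected, total_removed
-- ===== SOURCE B (Python) =====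
-- _VALID_AA = frozenset('ACDEFGHIKLMNPQRSTVWY')
--
-- def _scrub(seq):
--     # delete each distinct invalid character wholesale instead of filtering per position
--     for bad in set(seq) - _VALID_AA:
--         seq = seq.replace(bad, '')
--     return seq
--
-- def clean_sequences(sequences):
--     cleaned = {name: _scrub(seq) for name, seq in sequences.items()}
--     removed = [len(s) - len(c) for s, c in zip(sequences.values(), cleaned.values())]
--     return cleaned, sum(r > 0 for r in removed), sum(removed)
-- ===== Notes on version B (the rewrite author's own statement) =====
-- stated objective: alternative
-- what changed: B removes each distinct invalid character from the sequence wholesale (set(seq) - valid, then replace) instead of A's per-position filter, builds the cleaned dict by comprehension, and derives affected/total_removed afterwards from length differences instead of A's running counters.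
import Mathlib
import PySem

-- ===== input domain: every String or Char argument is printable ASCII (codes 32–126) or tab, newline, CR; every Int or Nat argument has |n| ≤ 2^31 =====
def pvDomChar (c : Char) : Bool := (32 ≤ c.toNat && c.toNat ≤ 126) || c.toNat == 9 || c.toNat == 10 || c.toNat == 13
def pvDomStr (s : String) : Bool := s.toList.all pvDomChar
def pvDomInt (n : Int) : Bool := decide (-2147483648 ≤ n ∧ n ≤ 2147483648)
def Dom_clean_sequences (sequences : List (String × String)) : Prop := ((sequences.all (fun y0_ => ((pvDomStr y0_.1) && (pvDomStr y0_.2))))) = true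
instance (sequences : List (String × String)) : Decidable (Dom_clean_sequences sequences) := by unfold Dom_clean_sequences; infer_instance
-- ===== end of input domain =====

-- B deletes each distinct invalid character wholesale (set difference + replace) and derives the
-- counters from length differences of the finished dict, instead of A's per-position filter with
-- running counters; objective: alternative.

-- ===== PORT A =====
-- _VALID_AA = set('ACDEFGHIKLMNPQRSTVWY')
def pvValidAA : PySem.Set Char := PySem.Set.ofList "ACDEFGHIKLMNPQRSTVWY".toList

def clean_sequences (sequences : List (String × String)) : (List (String × String)) × Int × Int :=
  let st := sequences.foldl
    (fun (st : PySem.Dict String String × Int × Int) p =>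
      let new_seq : List Char := p.2.toList.filter (fun aa => pvValidAA.contains aa)
      let st :=
        if new_seq.length ≠ p.2.toList.length then
          (st.1, st.2.1 + 1, st.2.2 + ((p.2.toList.length : Int) - (new_seq.length : Int)))
        else st
      (st.1.insert p.1 (String.ofList new_seq), st.2))
    (PySem.Dict.empty, 0, 0)
  (st.1.items, st.2)

-- ===== PORT B =====
-- _scrub: for bad in set(seq) - _VALID_AA: seq = seq.replace(bad, '')
-- (set iteration order is immaterial here: deleting distinct characters commutes)
def pvScrub (cs : List Char) : List Char :=
  (PySem.Set.diff (PySem.Set.ofList cs) pvValidAA).foldl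
    (fun s bad => s.filter (fun c => !(c == bad))) cs

def clean_sequences_alt (sequences : List (String × String)) : (List (String × String)) × Int × Int :=
  let cleaned := sequences.map (fun p => (p.1, String.ofList (pvScrub p.2.toList)))
  let removed := (sequences.zip cleaned).map
    (fun q => ((q.1.2.toList.length : Int) - (q.2.2.toList.length : Int)))
  (cleaned, (removed.countP (fun r => 0 < r) : Int), removed.sum)

-- ===== PRECONDITION & SPEC =====
-- Pre_ excludes lists with duplicate names: A's argument is a Python dict, whose item list cannot
-- repeat a key, so such lists represent no actual input of A (on the collapsed dict both programs agree).
def Pre_clean_sequences (sequences : List (String × String)) : Prop :=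
  (sequences.map Prod.fst).Nodup
instance (sequences : List (String × String)) : Decidable (Pre_clean_sequences sequences) := by
  unfold Pre_clean_sequences; infer_instance

def pvWitness_clean_sequences : (List (String × String)) := [("s1", "ACX"), ("s2", "MW")]

def Spec_clean_sequences (sequences : List (String × String)) (out : (List (String × String)) × Int × Int) : Prop := out = clean_sequences_alt sequences
instance (sequences : List (String × String)) (out : (List (String × String)) × Int × Int) : Decidable (Spec_clean_sequences sequences out) := by unfold Spec_clean_sequences; infer_instance

-- ===== CLAIM (what is proved, stated in full; the proofs are below) =====
def Claim_equal_clean_sequences : Prop := ∀ (sequences : List (String × String)), Dom_clean_sequences sequences → Pre_clean_sequences sequences → Spec_clean_sequences sequences (clean_sequences sequences)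

-- ===== LEMMAS AND PROOFS =====

-- folding single-character deletions over a list of bad characters is one filter
theorem pv_foldl_filter (bads : List Char) : ∀ (cs : List Char),
    bads.foldl (fun s bad => s.filter (fun c => !(c == bad))) cs
      = cs.filter (fun c => !(bads.contains c)) := by
  induction bads with
  | nil => intro cs; simp
  | cons b bads ih =>
    intro cs
    simp only [List.foldl_cons, ih, List.filter_filter]
    apply List.filter_congr
    intro c _
    simp only [List.contains_cons]
    cases h1 : c == b <;> cases h2 : bads.contains c <;> simp_all

-- deleting every distinct invalid character keeps exactly the valid ones
theorem pv_scrub_eq (cs : List Char) :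
    pvScrub cs = cs.filter (fun c => pvValidAA.contains c) := by
  unfold pvScrub
  rw [pv_foldl_filter]
  apply List.filter_congr
  intro c hc
  have hmem : PySem.Set.contains (PySem.Set.diff (PySem.Set.ofList cs) pvValidAA) c
      = !(pvValidAA.contains c) := by
    cases hv : pvValidAA.contains c with
    | true =>
      simp only [Bool.not_true]
      rw [← Bool.not_eq_true, PySem.Set.contains_iff, PySem.Set.mem_diff]
      rw [PySem.Set.contains_iff] at hv
      exact fun h => h.2 hv
    | false =>
      simp only [Bool.not_false]
      rw [PySem.Set.contains_iff, PySem.Set.mem_diff, PySem.Set.mem_ofList]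
      refine ⟨hc, fun h => ?_⟩
      rw [← PySem.Set.contains_iff, hv] at h
      exact absurd h (by simp)
  rw [← PySem.Set.contains_eq_listContains, hmem, Bool.not_not]

-- the per-sequence removal amounts B derives from length differences
def pvRemoved (l : List (String × String)) : List Int :=
  l.map (fun p => ((p.2.toList.length : Int)
    - ((p.2.toList.filter (fun c => pvValidAA.contains c)).length : Int)))

theorem pv_zip_removed (l : List (String × String)) :
    (l.zip (l.map (fun p => (p.1, String.ofList (pvScrub p.2.toList))))).map
        (fun q => ((q.1.2.toList.length : Int) - (q.2.2.toList.length : Int)))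
      = pvRemoved l := by
  induction l with
  | nil => simp [pvRemoved]
  | cons p l ih => simp [pvRemoved, pv_scrub_eq] at ih ⊢; exact ih

theorem pv_alt_eq (sequences : List (String × String)) :
    clean_sequences_alt sequences
      = (sequences.map (fun p => (p.1, String.ofList (pvScrub p.2.toList))),
         ((pvRemoved sequences).countP (fun r => 0 < r) : Int),
         (pvRemoved sequences).sum) := by
  unfold clean_sequences_alt
  simp only [pv_zip_removed]

theorem pv_main (l : List (String × String)) : ∀ (d : PySem.Dict String String) (a t : Int),
    (l.map Prod.fst).Nodup → (∀ p ∈ l, d.contains p.1 = false) →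
    (l.foldl
      (fun (st : PySem.Dict String String × Int × Int) p =>
        let new_seq : List Char := p.2.toList.filter (fun aa => pvValidAA.contains aa)
        let st :=
          if new_seq.length ≠ p.2.toList.length then
            (st.1, st.2.1 + 1, st.2.2 + ((p.2.toList.length : Int) - (new_seq.length : Int)))
          else st
        (st.1.insert p.1 (String.ofList new_seq), st.2))
      (d, a, t))
    = (l.foldl (fun d' p =>
         d'.insert p.1 (String.ofList (p.2.toList.filter (fun aa => pvValidAA.contains aa)))) d,
       a + ((pvRemoved l).countP (fun r => 0 < r) : Int),
       t + (pvRemoved l).sum) := by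
  induction l with
  | nil => intro d a t _ _; simp [pvRemoved]
  | cons p l ih =>
    intro d a t hnd hfresh
    simp only [List.map_cons, List.nodup_cons] at hnd
    have hfresh' : ∀ q ∈ l, (d.insert p.1 (String.ofList (p.2.toList.filter (fun aa => pvValidAA.contains aa)))).contains q.1 = false := by
      intro q hq
      rw [PySem.Dict.contains_insert]
      have hne : q.1 ≠ p.1 := by
        intro h; exact hnd.1 (h ▸ List.mem_map_of_mem hq)
      simp [hne, hfresh q (List.mem_cons_of_mem _ hq)]
    have hle : (p.2.toList.filter (fun aa => pvValidAA.contains aa)).length ≤ p.2.toList.length :=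
      List.length_filter_le _ _
    have hrem : pvRemoved (p :: l)
        = ((p.2.toList.length : Int) - ((p.2.toList.filter (fun aa => pvValidAA.contains aa)).length : Int)) :: pvRemoved l := by
      simp [pvRemoved]
    simp only [List.foldl_cons]
    by_cases hc : (p.2.toList.filter (fun aa => pvValidAA.contains aa)).length ≠ p.2.toList.length
    · simp only [if_pos hc]
      rw [ih _ _ _ hnd.2 hfresh']
      have hdec : decide ((0 : Int) < (p.2.toList.length : Int)
          - ((p.2.toList.filter (fun aa => pvValidAA.contains aa)).length : Int)) = true := by
        rw [decide_eq_true_iff]; omega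
      refine Prod.ext rfl (Prod.ext ?_ ?_)
      · rw [hrem, List.countP_cons, hdec]
        simp only [if_true]
        push_cast
        ring
      · rw [hrem, List.sum_cons]
        ring
    · simp only [if_neg hc]
      rw [ih _ _ _ hnd.2 hfresh']
      have hc' : (p.2.toList.filter (fun aa => pvValidAA.contains aa)).length = p.2.toList.length := by
        omega
      have hdec : decide ((0 : Int) < (p.2.toList.length : Int)
          - ((p.2.toList.filter (fun aa => pvValidAA.contains aa)).length : Int)) = false := by
        rw [decide_eq_false_iff_not]; omega
      refine Prod.ext rfl (Prod.ext ?_ ?_)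
      · rw [hrem, List.countP_cons, hdec]
        push_cast
        ring
      · rw [hrem, List.sum_cons]
        have hr0 : (p.2.toList.length : Int)
            - ((p.2.toList.filter (fun aa => pvValidAA.contains aa)).length : Int) = 0 := by
          omega
        rw [hr0]
        ring

theorem pv_dict_items (l : List (String × String)) (d : PySem.Dict String String)
    (hnd : (l.map Prod.fst).Nodup) (hfresh : ∀ p ∈ l, d.contains p.1 = false) :
    (l.foldl (fun d' p =>
       d'.insert p.1 (String.ofList (p.2.toList.filter (fun aa => pvValidAA.contains aa)))) d).items
      = d.items ++ l.map (fun p => (p.1, String.ofList (p.2.toList.filter (fun aa => pvValidAA.contains aa)))) := by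
  induction l generalizing d with
  | nil => simp
  | cons p l ih =>
    simp only [List.map_cons, List.nodup_cons] at hnd
    have h0 : d.contains p.1 = false := hfresh p (List.mem_cons_self ..)
    have hfresh' : ∀ q ∈ l, (d.insert p.1 (String.ofList (p.2.toList.filter (fun aa => pvValidAA.contains aa)))).contains q.1 = false := by
      intro q hq
      rw [PySem.Dict.contains_insert]
      have hne : q.1 ≠ p.1 := by
        intro h; exact hnd.1 (h ▸ List.mem_map_of_mem hq)
      simp [hne, hfresh q (List.mem_cons_of_mem _ hq)]
    simp only [List.foldl_cons]
    rw [ih _ hnd.2 hfresh', PySem.Dict.items_insert]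
    simp [h0]

-- ===== VERDICT (by name: the statement is the Claim_ definition above) =====
theorem clean_sequences_spec : Claim_equal_clean_sequences := by
  intro sequences _ hpre
  unfold Spec_clean_sequences
  unfold clean_sequences
  rw [pv_alt_eq]
  have hfresh : ∀ p ∈ sequences, (PySem.Dict.empty (κ := String) (ν := String)).contains p.1 = false := by
    intro p _; simp
  rw [pv_main sequences PySem.Dict.empty 0 0 hpre hfresh]
  simp only []
  rw [pv_dict_items sequences PySem.Dict.empty hpre hfresh]
  refine Prod.ext ?_ (Prod.ext ?_ ?_)
  · simp [pv_scrub_eq, PySem.Dict.empty]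
  · simp
  · simp
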